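-- pv_equiv track=rewrite | github.com/acartag7/handoff-guard | src/handoff/utils.py | _is_likely_truncated
-- ===== SOURCE A (Python) =====
-- def _is_likely_truncated(text: str) -> bool:
--     """Detect if JSON appears to be truncated (e.g., hit max_tokens).
--
--     Returns True if there are unmatched opening braces/brackets,
--     indicating the JSON was cut off before completion.
--     """
--     if not text:
--         return False
--
--     # Count unmatched braces/brackets, respecting JSON string boundaries
--     depth_brace = 0
--     depth_bracket = 0
--     in_string = False
--     escape = False
--
--     for ch in text:
--         if escape:
--             escape = False
--             continue
--
--         if ch == "\\":
--             if in_string: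
--                 escape = True
--             continue
--
--         if ch == '"':
--             in_string = not in_string
--             continue
--
--         if in_string:
--             continue
--
--         if ch == "{":
--             depth_brace += 1
--         elif ch == "}":
--             depth_brace -= 1
--         elif ch == "[":
--             depth_bracket += 1
--         elif ch == "]":
--             depth_bracket -= 1
--
--     return depth_brace > 0 or depth_bracket > 0
-- ===== SOURCE B (Python) =====
-- import re
--
-- _STRING_RE = re.compile(r'"(?:\\[\s\S]|[^"\\])*"?')
--
-- def _is_likely_truncated(text: str) -> bool:
--     """Strip JSON string literals with a regex (unterminated trailing string
--     included), then compare counts of opening vs closing braces/brackets."""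
--     if not text:
--         return False
--     stripped = _STRING_RE.sub('', text)
--     return stripped.count('{') > stripped.count('}') or stripped.count('[') > stripped.count(']')
-- ===== Notes on version B (the rewrite author's own statement) =====
-- stated objective: faster
-- what changed: Replaced the four-variable per-character state machine (depth counters + in_string/escape flags) by a two-phase strip-then-count: a regex deletes all JSON string literals (including an unterminated trailing one), then B compares the counts of opening vs closing braces and of opening vs closing brackets on the stripped text.
import Mathlib
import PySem

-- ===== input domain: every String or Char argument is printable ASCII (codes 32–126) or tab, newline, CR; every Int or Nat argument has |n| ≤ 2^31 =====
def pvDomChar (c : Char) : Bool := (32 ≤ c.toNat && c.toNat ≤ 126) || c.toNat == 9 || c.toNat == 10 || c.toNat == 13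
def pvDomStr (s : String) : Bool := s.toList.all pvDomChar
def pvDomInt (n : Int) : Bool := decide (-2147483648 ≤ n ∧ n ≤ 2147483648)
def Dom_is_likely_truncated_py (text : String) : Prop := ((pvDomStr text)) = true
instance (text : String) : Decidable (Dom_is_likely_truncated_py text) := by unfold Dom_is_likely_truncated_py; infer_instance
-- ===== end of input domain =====

-- B replaces A's four-variable character state machine by strip-string-literals-then-count
-- (objective: alternative decomposition, same exact behaviour).

-- ===== PORT A =====
-- A's for-loop over text with state (depth_brace, depth_bracket, in_string, escape)
def pvLoopA : List Char → Int → Int → Bool → Bool → Int × Int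
  | [], b, k, _, _ => (b, k)
  | c :: cs, b, k, ins, esc =>
    if esc then pvLoopA cs b k ins false
    else if c = '\\' then
      (if ins then pvLoopA cs b k ins true else pvLoopA cs b k ins esc)
    else if c = '"' then pvLoopA cs b k (!ins) esc
    else if ins then pvLoopA cs b k ins esc
    else if c = '{' then pvLoopA cs (b + 1) k ins esc
    else if c = '}' then pvLoopA cs (b - 1) k ins esc
    else if c = '[' then pvLoopA cs b (k + 1) ins esc
    else if c = ']' then pvLoopA cs b (k - 1) ins esc
    else pvLoopA cs b k ins esc

def is_likely_truncated_py (text : String) : Bool :=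
  if text = "" then false
  else
    let r := pvLoopA text.toList 0 0 false false
    decide (r.1 > 0) || decide (r.2 > 0)

-- ===== PORT B =====
-- hand port of the regex r'"(?:\\[\s\S]|[^"\\])*"?' used by re.sub in Source B (exact for
-- this pattern): pvSkipStr consumes one greedy, possibly unterminated string-literal
-- body after the opening quote and returns the unconsumed remainder.
def pvSkipStr : List Char → List Char
  | [] => []
  | c :: cs =>
    if c = '"' then cs
    else if c = '\\' then
      match cs with
      | [] => [c]
      | _ :: ds => pvSkipStr ds
    else pvSkipStr cs

theorem pvSkipStr_length_le : ∀ cs : List Char, (pvSkipStr cs).length ≤ cs.length := by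
  intro cs
  fun_induction pvSkipStr cs <;> simp [*] at * <;> omega

-- re.sub of the pattern with '': every match starts at a '"'; other chars are copied.
def pvStrip : List Char → List Char
  | [] => []
  | c :: cs =>
    if c = '"' then pvStrip (pvSkipStr cs) else c :: pvStrip cs
termination_by l => l.length
decreasing_by
  · have := pvSkipStr_length_le cs; simp; omega
  · simp

def is_likely_truncated_py_alt (text : String) : Bool :=
  if text = "" then false
  else
    let l := pvStrip text.toList
    decide (l.count '{' > l.count '}') || decide (l.count '[' > l.count ']')

-- ===== PRECONDITION & SPEC =====
def Spec_is_likely_truncated_py (text : String) (out : Bool) : Prop := out = is_likely_truncated_py_alt text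
instance (text : String) (out : Bool) : Decidable (Spec_is_likely_truncated_py text out) := by unfold Spec_is_likely_truncated_py; infer_instance

-- ===== CLAIM (what is proved, stated in full; the proofs are below) =====
def Claim_equal_is_likely_truncated_py : Prop := ∀ (text : String), Dom_is_likely_truncated_py text → Spec_is_likely_truncated_py text (is_likely_truncated_py text)

-- ===== LEMMAS AND PROOFS =====

-- inside a string (escape off), A's loop resumes outside the string exactly at pvSkipStr's remainder
theorem pvLoopA_in_string (cs : List Char) (b k : Int) :
    pvLoopA cs b k true false = pvLoopA (pvSkipStr cs) b k false false := by
  fun_induction pvSkipStr cs generalizing b k <;> simp [pvLoopA, *]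

-- outside a string, A's final depths over l are the starting depths plus the brace/bracket
-- balances of the stripped text pvStrip l
theorem pvLoopA_strip (l : List Char) (b k : Int) :
    pvLoopA l b k false false =
      (b + ((pvStrip l).count '{' : Int) - ((pvStrip l).count '}' : Int),
       k + ((pvStrip l).count '[' : Int) - ((pvStrip l).count ']' : Int)) := by
  fun_induction pvStrip l generalizing b k with
  | case1 => simp [pvLoopA]
  | case2 cs ih =>
      rw [show pvLoopA ('"' :: cs) b k false false = pvLoopA cs b k true false from by
        simp [pvLoopA]]
      rw [pvLoopA_in_string, ih]
  | case3 c cs h ih =>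
      by_cases h1 : c = '{' <;> by_cases h2 : c = '}' <;> by_cases h3 : c = '[' <;>
        by_cases h4 : c = ']' <;> by_cases hb : c = '\\' <;>
        simp_all [pvLoopA] <;> omega

-- ===== VERDICT (by name: the statement is the Claim_ definition above) =====
theorem is_likely_truncated_py_spec : Claim_equal_is_likely_truncated_py := by
  intro text _
  unfold Spec_is_likely_truncated_py is_likely_truncated_py is_likely_truncated_py_alt
  by_cases h : text = ""
  · simp [h]
  · simp only [if_neg h]
    rw [pvLoopA_strip]
    congr 1 <;> simp only [decide_eq_decide] <;> omega
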